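-- pv_equiv track=rewrite | github.com/AruJoy/algorithm-study | 백준/Gold/20327. 배열 돌리기 6/배열 돌리기 6.py | act_7
-- ===== SOURCE A (Python) =====
-- def act_7(scale, matrix, s_scale):
--     new_matrix = [row[:] for row in matrix]
--     repeat = scale//s_scale
--     for i in range(repeat):
--         for j in range(repeat):
--             for dy in range(s_scale):
--                 for dx in range(s_scale):
--                     new_matrix[i*s_scale+dy][j*s_scale+dx] = matrix[(repeat-1-j)*s_scale+dy][i*s_scale+dx]
--     return new_matrix
-- ===== SOURCE B (Python) =====
-- def act_7(scale, matrix, s_scale):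
--     # Factor the block rotation as two staged passes over the covered region:
--     # a vertical flip of block-rows, then a block-level transpose.
--     new_matrix = [row[:] for row in matrix]
--     if s_scale <= 0:
--         return new_matrix
--     repeat = scale // s_scale
--     n = repeat * s_scale
--     if n <= 0:
--         return new_matrix
--     # stage 1: vertical flip of the block-rows inside the covered n x n region
--     tmp = [row[:] for row in matrix]
--     for r in range(n):
--         band, dy = divmod(r, s_scale)
--         tmp[r][:n] = matrix[(repeat - 1 - band) * s_scale + dy][:n]
--     # stage 2: block transpose (swap block coordinates, keep in-block offsets)
--     for r in range(n):
--         band, dy = divmod(r, s_scale)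
--         new_matrix[r][:n] = [tmp[(c // s_scale) * s_scale + dy][band * s_scale + c % s_scale]
--                              for c in range(n)]
--     return new_matrix
-- ===== Notes on version B (the rewrite author's own statement) =====
-- stated objective: alternative
-- what changed: A writes every output element in one quadruple loop using the combined rotation index formula; B factors the block rotation into two staged passes -- first a vertical flip of the block-rows into a temporary matrix, then a block-level transpose that rebuilds each covered row in one slice assignment -- recovering each cell's block coordinates by divmod.
import Mathlib
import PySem

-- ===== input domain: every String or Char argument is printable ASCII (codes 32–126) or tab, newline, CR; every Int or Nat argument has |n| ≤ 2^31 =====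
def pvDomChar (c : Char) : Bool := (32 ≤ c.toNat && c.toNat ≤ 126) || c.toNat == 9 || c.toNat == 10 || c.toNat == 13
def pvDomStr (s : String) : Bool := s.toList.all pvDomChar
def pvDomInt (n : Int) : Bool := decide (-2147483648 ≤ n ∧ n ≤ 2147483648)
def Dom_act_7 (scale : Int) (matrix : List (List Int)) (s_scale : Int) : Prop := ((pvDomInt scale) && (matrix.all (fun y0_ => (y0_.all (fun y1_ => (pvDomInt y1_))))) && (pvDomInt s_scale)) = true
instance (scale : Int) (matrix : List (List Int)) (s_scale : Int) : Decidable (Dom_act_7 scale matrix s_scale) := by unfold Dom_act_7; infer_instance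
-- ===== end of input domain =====

-- B factors A's one-shot quadruple rotation loop into two staged passes — a vertical flip of the
-- block-rows into a temporary matrix, then a block-level transpose that rebuilds each covered row
-- in one slice assignment (objective: alternative decomposition; same asymptotic cost).

-- ===== PORT A =====
-- matrix[r][c]: exact whenever both indices are in range, which Pre_act_7 guarantees for every access
def pyGet2 (m : List (List Int)) (r c : Int) : Int :=
  PySem.List.pyGetD (PySem.List.pyGetD m r []) c 0

-- new_matrix[r][c] = v: exact for 0 ≤ r < len m, 0 ≤ c < len (m[r]), which Pre_act_7 guarantees
def pySet2 (m : List (List Int)) (r c : Int) (v : Int) : List (List Int) :=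
  m.modify r.toNat (fun row => row.set c.toNat v)

def act_7 (scale : Int) (matrix : List (List Int)) (s_scale : Int) : List (List Int) :=
  -- new_matrix = [row[:] for row in matrix]: copying is the identity on pure lists
  let new_matrix := matrix
  let rep := PySem.Int.floordiv scale s_scale
  (PySem.List.pyRange 0 rep 1).foldl (fun nm i =>
    (PySem.List.pyRange 0 rep 1).foldl (fun nm j =>
      (PySem.List.pyRange 0 s_scale 1).foldl (fun nm dy =>
        (PySem.List.pyRange 0 s_scale 1).foldl (fun nm dx =>
          pySet2 nm (i * s_scale + dy) (j * s_scale + dx)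
            (pyGet2 matrix ((rep - 1 - j) * s_scale + dy) (i * s_scale + dx))) nm) nm) nm)
    new_matrix

-- ===== PORT B =====
def act_7_alt (scale : Int) (matrix : List (List Int)) (s_scale : Int) : List (List Int) :=
  -- new_matrix / tmp start as copies of matrix; copying is the identity on pure lists
  if s_scale ≤ 0 then matrix
  else
    let rep := PySem.Int.floordiv scale s_scale
    let n := rep * s_scale
    if n ≤ 0 then matrix
    else
      -- stage 1: tmp[r][:n] = matrix[(rep-1-band)*s_scale+dy][:n]
      -- (slice assignment row[:n] = seg is seg ++ row[n:], exact since 0 ≤ n)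
      let tmp := (PySem.List.pyRange 0 n 1).foldl (fun tmp r =>
        let band := PySem.Int.floordiv r s_scale
        let dy := PySem.Int.mod r s_scale
        tmp.modify r.toNat (fun row =>
          PySem.List.slice
              (PySem.List.pyGetD matrix ((rep - 1 - band) * s_scale + dy) []) none (some n)
            ++ row.drop n.toNat)) matrix
      -- stage 2: new_matrix[r][:n] = [tmp[(c//s)*s+dy][band*s+c%s] for c in range(n)]
      (PySem.List.pyRange 0 n 1).foldl (fun nm r =>
        let band := PySem.Int.floordiv r s_scale
        let dy := PySem.Int.mod r s_scale
        nm.modify r.toNat (fun row =>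
          (PySem.List.pyRange 0 n 1).map (fun c =>
            pyGet2 tmp (PySem.Int.floordiv c s_scale * s_scale + dy)
              (band * s_scale + PySem.Int.mod c s_scale))
            ++ row.drop n.toNat)) matrix

-- ===== PRECONDITION & SPEC =====
-- Pre_act_7 = exactly the inputs on which A returns: s_scale ≠ 0 (else ZeroDivisionError) and, when
-- the loops run (s_scale > 0), the covered n×n region (n = (scale//s_scale)*s_scale) fits inside
-- matrix (else IndexError).
def Pre_act_7 (scale : Int) (matrix : List (List Int)) (s_scale : Int) : Prop :=
  s_scale ≠ 0 ∧
  (0 < s_scale →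
    ((PySem.Int.floordiv scale s_scale) * s_scale).toNat ≤ matrix.length ∧
    ∀ row ∈ matrix.take ((PySem.Int.floordiv scale s_scale) * s_scale).toNat,
      ((PySem.Int.floordiv scale s_scale) * s_scale).toNat ≤ row.length)
instance (scale : Int) (matrix : List (List Int)) (s_scale : Int) : Decidable (Pre_act_7 scale matrix s_scale) := by unfold Pre_act_7; infer_instance

def pvWitness_act_7 : Int × List (List Int) × Int := (4, [[1,2,3,4],[5,6,7,8],[9,10,11,12],[13,14,15,16]], 2)

def Spec_act_7 (scale : Int) (matrix : List (List Int)) (s_scale : Int) (out : List (List Int)) : Prop := out = act_7_alt scale matrix s_scale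
instance (scale : Int) (matrix : List (List Int)) (s_scale : Int) (out : List (List Int)) : Decidable (Spec_act_7 scale matrix s_scale out) := by unfold Spec_act_7; infer_instance

-- ===== CLAIM (what is proved, stated in full; the proofs are below) =====
def Claim_equal_act_7 : Prop := ∀ (scale : Int) (matrix : List (List Int)) (s_scale : Int), Dom_act_7 scale matrix s_scale → Pre_act_7 scale matrix s_scale → Spec_act_7 scale matrix s_scale (act_7 scale matrix s_scale)

-- ===== LEMMAS AND PROOFS =====

-- the value A writes at offset (dy,dx) of output block (i,j)
def gval (matrix : List (List Int)) (s R i j dy dx : Nat) : Int :=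
  (matrix.getD ((R - 1 - j) * s + dy) []).getD (i * s + dx) 0

-- a list of row-edit operations applied in order (the common normal form of both programs)
def applyOps (ops : List (Nat × (List Int → List Int))) (m : List (List Int)) : List (List Int) :=
  ops.foldl (fun nm p => nm.modify p.1 p.2) m

theorem length_applyOps : ∀ (ops : List (Nat × (List Int → List Int))) (m : List (List Int)),
    (applyOps ops m).length = m.length
  | [], _ => rfl
  | p :: ops, m => by
    show (applyOps ops (m.modify p.1 p.2)).length = m.length
    rw [length_applyOps ops, List.length_modify]

theorem getD_modify (m : List (List Int)) (r k : Nat) (f : List Int → List Int)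
    (hr : r < m.length) :
    (m.modify r f).getD k [] = if r = k then f (m.getD k []) else m.getD k [] := by
  by_cases hk : k < m.length
  · rw [List.getD_eq_getElem _ _ (by simpa using hk), List.getD_eq_getElem _ _ hk,
      List.getElem_modify]
  · have h1 : m.length ≤ k := by omega
    rw [if_neg (show ¬ r = k by omega)]
    rw [List.getD_eq_default _ _ (show (m.modify r f).length ≤ k by simpa using h1),
      List.getD_eq_default _ _ h1]

theorem getD_applyOps : ∀ (ops : List (Nat × (List Int → List Int))) (m : List (List Int)),
    (∀ p ∈ ops, p.1 < m.length) → ∀ k,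
    (applyOps ops m).getD k [] =
      ((ops.filter (fun p => p.1 == k)).map Prod.snd).foldl (fun row f => f row) (m.getD k [])
  | [], _, _, _ => rfl
  | p :: ops, m, h, k => by
    have hp : p.1 < m.length := h p (by simp)
    have ih := getD_applyOps ops (m.modify p.1 p.2)
      (fun q hq => by simpa using h q (by simp [hq])) k
    show (applyOps ops (m.modify p.1 p.2)).getD k [] = _
    rw [ih, getD_modify m p.1 k p.2 hp, List.filter_cons]
    by_cases hpk : p.1 = k
    · simp [hpk]
    · simp [hpk]

theorem pyRange_cast (N : Nat) :
    PySem.List.pyRange 0 (N : Int) 1 = (List.range N).map (fun k : Nat => (k : Int)) := by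
  rw [PySem.List.pyRange_one]; simp

theorem getD_append_left (l1 l2 : List Int) (k : Nat) (h : k < l1.length) :
    (l1 ++ l2).getD k 0 = l1.getD k 0 := by
  simp [List.getD, List.getElem?_append_left h]

theorem getD_take (l : List Int) (n k : Nat) (h : k < n) :
    (l.take n).getD k 0 = l.getD k 0 := by
  simp [List.getD, h]

theorem divmod_block (s i dy : Nat) (hs : 0 < s) (hdy : dy < s) :
    (i * s + dy) / s = i ∧ (i * s + dy) % s = dy := by
  constructor
  · rw [Nat.add_comm, Nat.add_mul_div_right _ _ hs, Nat.div_eq_of_lt hdy]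
    omega
  · rw [Nat.add_comm, Nat.add_mul_mod_self_right, Nat.mod_eq_of_lt hdy]

theorem blockIdx_lt (s R i dy : Nat) (hi : i < R) (hdy : dy < s) : i * s + dy < R * s :=
  calc i * s + dy < i * s + s := by omega
  _ = (i + 1) * s := by ring
  _ ≤ R * s := Nat.mul_le_mul_right _ (by omega)

theorem flatMap_eq_single {β : Type} (f : Nat → List β) : ∀ (R i0 : Nat), i0 < R →
    (∀ i, i < R → i ≠ i0 → f i = []) → (List.range R).flatMap f = f i0
  | 0, _, h, _ => absurd h (by omega)
  | R + 1, i0, h, hz => by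
    rw [List.range_succ, List.flatMap_append]
    simp only [List.flatMap_cons, List.flatMap_nil, List.append_nil]
    by_cases hR : i0 = R
    · subst hR
      rw [List.flatMap_eq_nil_iff.mpr
        (fun x hx => hz x (by have := List.mem_range.mp hx; omega)
          (by have := List.mem_range.mp hx; omega))]
      simp
    · rw [hz R (by omega) (fun he => hR (he.symm)),
        flatMap_eq_single f R i0 (by omega) (fun i hi hne => hz i (by omega) hne)]
      simp

theorem range_filter_beq : ∀ (N k : Nat),
    (List.range N).filter (fun r => r == k) = if k < N then [k] else []
  | 0, k => by simp
  | N + 1, k => by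
    rw [List.range_succ, List.filter_append, range_filter_beq N k]
    by_cases h2 : N = k
    · subst h2; simp
    · by_cases h1 : k < N
      · have h3 : k < N + 1 := by omega
        simp [h1, h2, h3]
      · have h3 : ¬ k < N + 1 := by omega
        simp [h1, h2, h3]

theorem getD_applyOps_map_range (F : Nat → List Int → List Int) (N : Nat)
    (m : List (List Int)) (hml : N ≤ m.length) (k : Nat) :
    (applyOps ((List.range N).map (fun r => (r, F r))) m).getD k [] =
      if k < N then F k (m.getD k []) else m.getD k [] := by
  rw [getD_applyOps _ _ (by
    intro p hp
    simp only [List.mem_map, List.mem_range] at hp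
    obtain ⟨r, hr, rfl⟩ := hp
    simpa using lt_of_lt_of_le hr hml) k]
  rw [List.filter_map]
  have hpred : ((fun p : Nat × (List Int → List Int) => p.1 == k) ∘ fun r => (r, F r))
      = fun r => r == k := by funext r; simp
  rw [hpred, range_filter_beq]
  by_cases hkN : k < N
  · simp [hkN]
  · simp [hkN]

-- writes the out-of-range row sets into a whole-prefix rewrite (used on A's filtered op list)
theorem range_foldl_set (g : Nat → Int) (c : Nat) :
    ∀ (s : Nat) (row : List Int), c + s ≤ row.length →
      (List.range s).foldl (fun row dx => row.set (c + dx) (g dx)) row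
        = row.take c ++ (List.range s).map g ++ row.drop (c + s)
  | 0, row, h => by simp
  | s + 1, row, h => by
    rw [List.range_succ, List.foldl_append, range_foldl_set g c s row (by omega)]
    simp only [List.foldl_cons, List.foldl_nil]
    have hc : (row.take c ++ (List.range s).map g).length = c + s := by
      simp; omega
    rw [List.set_append, if_neg (by simp [hc])]
    rw [hc, Nat.sub_self]
    have hdrop : row.drop (c + s) = row[c + s] :: row.drop (c + s + 1) :=
      List.drop_eq_getElem_cons (by omega)
    simp [hdrop, List.append_assoc, Nat.add_assoc]

theorem sets_to_prefix (g : Nat → Nat → Int) (s : Nat) (hs : 0 < s) :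
    ∀ (J : Nat) (row : List Int), J * s ≤ row.length →
      (List.range J).foldl (fun row j =>
          (List.range s).foldl (fun row dx => row.set (j * s + dx) (g j dx)) row) row
        = (List.range (J * s)).map (fun c => g (c / s) (c % s)) ++ row.drop (J * s)
  | 0, row, _ => by simp
  | J + 1, row, h => by
    have hsJ : (J + 1) * s = J * s + s := Nat.succ_mul J s
    rw [List.range_succ, List.foldl_append,
      sets_to_prefix g s hs J row (by omega)]
    simp only [List.foldl_cons, List.foldl_nil]
    have hpre : ((List.range (J * s)).map (fun c => g (c / s) (c % s))).length = J * s := by simp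
    rw [range_foldl_set (g J) (J * s) s _ (by simp; omega)]
    rw [List.take_left' hpre]
    have hdrop : ((List.range (J * s)).map (fun c => g (c / s) (c % s))
        ++ row.drop (J * s)).drop (J * s + s) = row.drop ((J + 1) * s) := by
      rw [show J * s + s = ((List.range (J * s)).map (fun c => g (c / s) (c % s))).length + s by
        rw [hpre]]
      rw [List.drop_length_add_append, List.drop_drop]
      congr 1; omega
    rw [hdrop, hsJ, List.range_add, List.map_append]
    congr 1
    congr 1
    rw [List.map_map]
    apply List.map_congr_left
    intro dx hdx
    have hdx' : dx < s := List.mem_range.mp hdx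
    have e1 : (J * s + dx) / s = J := by
      rw [Nat.add_comm, Nat.add_mul_div_right _ _ hs, Nat.div_eq_of_lt hdx']
      omega
    have e2 : (J * s + dx) % s = dx := by
      rw [Nat.add_comm, Nat.add_mul_mod_self_right, Nat.mod_eq_of_lt hdx']
    simp [e1, e2]

-- ---- A as an op list -------------------------------------------------------

def opsA (matrix : List (List Int)) (s R : Nat) : List (Nat × (List Int → List Int)) :=
  (List.range R).flatMap (fun i => (List.range R).flatMap (fun j =>
    (List.range s).flatMap (fun dy => (List.range s).map (fun dx =>
      (i * s + dy, fun row => row.set (j * s + dx) (gval matrix s R i j dy dx))))))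

theorem A_eq_applyOps (matrix : List (List Int)) (s R : Nat)
    (scale s_scale : Int) (hss : s_scale = (s : Int))
    (hrd : PySem.Int.floordiv scale s_scale = (R : Int)) :
    act_7 scale matrix s_scale = applyOps (opsA matrix s R) matrix := by
  simp only [act_7]
  rw [hrd, hss, pyRange_cast R, pyRange_cast s]
  simp only [applyOps, opsA, List.foldl_flatMap, List.foldl_map]
  apply PySem.List.foldl_congr_mem
  intro nm i hi
  apply PySem.List.foldl_congr_mem
  intro nm2 j hj
  apply PySem.List.foldl_congr_mem
  intro nm3 dy hdy
  apply PySem.List.foldl_congr_mem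
  intro nm4 dx hdx
  have hj' : j < R := List.mem_range.mp hj
  have h0 : ((R - 1 - j : Nat) : Int) = (R : Int) - 1 - (j : Int) := by omega
  have h1 : ((R : Int) - 1 - (j : Int)) * (s : Int) + (dy : Int)
      = (((R - 1 - j) * s + dy : Nat) : Int) := by rw [← h0]; push_cast; ring
  have hcast : ∀ (a b : Nat), ((a : Int) * (s : Int) + (b : Int)) = ((a * s + b : Nat) : Int) := by
    intro a b; push_cast; ring
  unfold pySet2 pyGet2 gval
  rw [hcast i dy, hcast j dx, hcast i dx, h1, Int.toNat_natCast, Int.toNat_natCast,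
    PySem.List.pyGetD_natCast, PySem.List.pyGetD_natCast]

theorem fst_opsA_lt (matrix : List (List Int)) (s R : Nat)
    (p : Nat × (List Int → List Int)) (hp : p ∈ opsA matrix s R) : p.1 < R * s := by
  simp only [opsA, List.mem_flatMap, List.mem_map, List.mem_range] at hp
  obtain ⟨i, hi, j, hj, dy, hdy, dx, hdx, rfl⟩ := hp
  exact blockIdx_lt s R i dy hi hdy

theorem filter_opsA_lt (matrix : List (List Int)) (s R : Nat) (hs : 0 < s)
    (i0 dy0 : Nat) (hi0 : i0 < R) (hdy0 : dy0 < s) :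
    (opsA matrix s R).filter (fun p => p.1 == i0 * s + dy0) =
      (List.range R).flatMap (fun j => (List.range s).map (fun dx =>
        (i0 * s + dy0, fun row : List Int =>
          row.set (j * s + dx) (gval matrix s R i0 j dy0 dx)))) := by
  unfold opsA
  simp only [List.filter_flatMap, List.filter_map, Function.comp_def]
  rw [flatMap_eq_single _ R i0 hi0 (by
    intro i hi hne
    apply List.flatMap_eq_nil_iff.mpr
    intro j hj
    apply List.flatMap_eq_nil_iff.mpr
    intro dy hdy
    have hdy' : dy < s := List.mem_range.mp hdy
    have hneq : ¬ (i * s + dy = i0 * s + dy0) := by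
      intro he
      have e1 : (i * s + dy) / s = i := (divmod_block s i dy hs hdy').1
      have e2 : (i0 * s + dy0) / s = i0 := (divmod_block s i0 dy0 hs hdy0).1
      rw [he, e2] at e1
      exact hne e1.symm
    rw [List.filter_eq_nil_iff.mpr (by intro a ha; simp only [beq_iff_eq]; exact hneq)]
    simp)]
  apply List.flatMap_congr
  intro j hj
  rw [flatMap_eq_single _ s dy0 hdy0 (by
    intro dy hdy hne
    have hneq : ¬ (i0 * s + dy = i0 * s + dy0) := by omega
    rw [List.filter_eq_nil_iff.mpr (by intro a ha; simp only [beq_iff_eq]; exact hneq)]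
    simp)]
  rw [List.filter_eq_self.mpr (by intro a ha; simp)]

theorem A_row (matrix : List (List Int)) (s R : Nat) (hs : 0 < s) (i0 dy0 : Nat)
    (hi0 : i0 < R) (hdy0 : dy0 < s) (hml : R * s ≤ matrix.length)
    (hrl : R * s ≤ (matrix.getD (i0 * s + dy0) []).length) :
    (applyOps (opsA matrix s R) matrix).getD (i0 * s + dy0) [] =
      (List.range (R * s)).map (fun c => gval matrix s R i0 (c / s) dy0 (c % s))
        ++ (matrix.getD (i0 * s + dy0) []).drop (R * s) := by
  rw [getD_applyOps _ _ (fun p hp => lt_of_lt_of_le (fst_opsA_lt matrix s R p hp) hml)]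
  rw [filter_opsA_lt matrix s R hs i0 dy0 hi0 hdy0]
  simp only [List.map_flatMap, List.map_map, List.foldl_flatMap, List.foldl_map,
    Function.comp_def]
  exact sets_to_prefix (fun j dx => gval matrix s R i0 j dy0 dx) s hs R _ hrl

-- ---- B as op lists ---------------------------------------------------------

def segT (matrix : List (List Int)) (s R N r : Nat) : List Int :=
  (matrix.getD ((R - 1 - r / s) * s + r % s) []).take N

def FT (matrix : List (List Int)) (s R N r : Nat) : List Int → List Int :=
  fun row => segT matrix s R N r ++ row.drop N

def opsT (matrix : List (List Int)) (s R N : Nat) : List (Nat × (List Int → List Int)) :=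
  (List.range N).map (fun r => (r, FT matrix s R N r))

def tmpB (matrix : List (List Int)) (s R N : Nat) : List (List Int) :=
  applyOps (opsT matrix s R N) matrix

def segB (t : List (List Int)) (s N r : Nat) : List Int :=
  (List.range N).map (fun c => (t.getD (c / s * s + r % s) []).getD (r / s * s + c % s) 0)

def FB (t : List (List Int)) (s N r : Nat) : List Int → List Int :=
  fun row => segB t s N r ++ row.drop N

def opsB (t : List (List Int)) (s N : Nat) : List (Nat × (List Int → List Int)) :=
  (List.range N).map (fun r => (r, FB t s N r))

theorem stage1_eq (matrix : List (List Int)) (s R : Nat) (hs : 0 < s) :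
    (PySem.List.pyRange 0 ((R * s : Nat) : Int) 1).foldl (fun tmp r =>
        tmp.modify r.toNat (fun row =>
          PySem.List.slice
              (PySem.List.pyGetD matrix
                (((R : Int) - 1 - PySem.Int.floordiv r (s : Int)) * (s : Int)
                  + PySem.Int.mod r (s : Int)) []) none (some ((R * s : Nat) : Int))
            ++ row.drop ((R * s : Nat) : Int).toNat)) matrix
      = tmpB matrix s R (R * s) := by
  rw [pyRange_cast (R * s)]
  simp only [tmpB, applyOps, opsT, List.foldl_map]
  apply PySem.List.foldl_congr_mem
  intro acc r hr
  have hr' : r < R * s := List.mem_range.mp hr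
  have hdiv : r / s < R := (Nat.div_lt_iff_lt_mul hs).mpr hr'
  rw [Int.toNat_natCast]
  congr 1
  funext row
  have e0 : PySem.Int.floordiv (r : Int) (s : Int) = ((r / s : Nat) : Int) :=
    PySem.Int.floordiv_natCast r s
  have e1 : PySem.Int.mod (r : Int) (s : Int) = ((r % s : Nat) : Int) :=
    PySem.Int.mod_natCast r s
  have e2 : (R : Int) - 1 - ((r / s : Nat) : Int) = ((R - 1 - r / s : Nat) : Int) := by omega
  have e3 : ((R - 1 - r / s : Nat) : Int) * (s : Int) + ((r % s : Nat) : Int)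
      = (((R - 1 - r / s) * s + r % s : Nat) : Int) := by push_cast; ring
  rw [e0, e1, e2, e3, PySem.List.pyGetD_natCast, PySem.List.slice_to_natCast,
    Int.toNat_natCast]
  rfl

theorem stage2_eq (matrix : List (List Int)) (s R : Nat)
    (t : List (List Int)) :
    (PySem.List.pyRange 0 ((R * s : Nat) : Int) 1).foldl (fun nm r =>
        nm.modify r.toNat (fun row =>
          (PySem.List.pyRange 0 ((R * s : Nat) : Int) 1).map (fun c =>
            pyGet2 t (PySem.Int.floordiv c (s : Int) * (s : Int) + PySem.Int.mod r (s : Int))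
              (PySem.Int.floordiv r (s : Int) * (s : Int) + PySem.Int.mod c (s : Int)))
            ++ row.drop ((R * s : Nat) : Int).toNat)) matrix
      = applyOps (opsB t s (R * s)) matrix := by
  rw [pyRange_cast (R * s)]
  simp only [applyOps, opsB, List.foldl_map]
  apply PySem.List.foldl_congr_mem
  intro acc r hr
  rw [Int.toNat_natCast]
  congr 1
  funext row
  rw [Int.toNat_natCast]
  simp only [FB, segB]
  congr 1
  · rw [List.map_map]
    apply List.map_congr_left
    intro c hc
    have ec0 : PySem.Int.floordiv (c : Int) (s : Int) = ((c / s : Nat) : Int) :=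
      PySem.Int.floordiv_natCast c s
    have ec1 : PySem.Int.mod (c : Int) (s : Int) = ((c % s : Nat) : Int) :=
      PySem.Int.mod_natCast c s
    have er0 : PySem.Int.floordiv (r : Int) (s : Int) = ((r / s : Nat) : Int) :=
      PySem.Int.floordiv_natCast r s
    have er1 : PySem.Int.mod (r : Int) (s : Int) = ((r % s : Nat) : Int) :=
      PySem.Int.mod_natCast r s
    have ea : ((c / s : Nat) : Int) * (s : Int) + ((r % s : Nat) : Int)
        = ((c / s * s + r % s : Nat) : Int) := by push_cast; ring
    have eb : ((r / s : Nat) : Int) * (s : Int) + ((c % s : Nat) : Int)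
        = ((r / s * s + c % s : Nat) : Int) := by push_cast; ring
    simp only [Function.comp_apply]
    unfold pyGet2
    rw [ec0, ec1, er0, er1, ea, eb, PySem.List.pyGetD_natCast, PySem.List.pyGetD_natCast]

theorem B_eq_applyOps (matrix : List (List Int)) (s R : Nat) (hs : 0 < s) (hR : 0 < R)
    (scale s_scale : Int) (hss : s_scale = (s : Int))
    (hrd : PySem.Int.floordiv scale s_scale = (R : Int)) :
    act_7_alt scale matrix s_scale = applyOps (opsB (tmpB matrix s R (R * s)) s (R * s)) matrix := by
  have hrd' : PySem.Int.floordiv scale (s : Int) = (R : Int) := by rw [← hss]; exact hrd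
  have hN : (R : Int) * (s : Int) = ((R * s : Nat) : Int) := by push_cast; ring
  have hs' : (0 : Int) < (s : Int) := by exact_mod_cast hs
  have hRs : (0 : Int) < ((R * s : Nat) : Int) := by exact_mod_cast Nat.mul_pos hR hs
  simp only [act_7_alt, hss, hrd']
  rw [if_neg (by omega), hN, if_neg (by omega)]
  rw [stage1_eq matrix s R hs]
  exact stage2_eq matrix s R (tmpB matrix s R (R * s))

-- ---- main ------------------------------------------------------------------

theorem act_7_main : ∀ (scale : Int) (matrix : List (List Int)) (s_scale : Int),
    Pre_act_7 scale matrix s_scale → act_7 scale matrix s_scale = act_7_alt scale matrix s_scale := by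
  intro scale matrix s_scale hpre
  obtain ⟨hnz, hbounds⟩ := hpre
  by_cases hs : 0 < s_scale
  · by_cases hrep : 0 < PySem.Int.floordiv scale s_scale
    · -- main case
      obtain ⟨hml, hrowmem⟩ := hbounds hs
      have hss : s_scale = (s_scale.toNat : Int) := by omega
      have hRR : PySem.Int.floordiv scale s_scale
          = ((PySem.Int.floordiv scale s_scale).toNat : Int) := by omega
      set s := s_scale.toNat
      set R := (PySem.Int.floordiv scale s_scale).toNat
      have hn : (PySem.Int.floordiv scale s_scale * s_scale).toNat = R * s := by
        rw [hRR, hss, ← Nat.cast_mul, Int.toNat_natCast]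
      rw [hn] at hml hrowmem
      have hrow : ∀ k, k < R * s → R * s ≤ (matrix.getD k []).length := by
        intro k hk
        have hkl : k < matrix.length := by omega
        have hmem : matrix[k] ∈ matrix.take (R * s) := by
          have h2 : k < (matrix.take (R * s)).length := by simp; omega
          have h3 : (matrix.take (R * s))[k] = matrix[k] := List.getElem_take
          rw [← h3]; exact List.getElem_mem h2
        rw [List.getD_eq_getElem matrix [] hkl]
        exact hrowmem _ hmem
      have hs' : 0 < s := by omega
      have hR' : 0 < R := by omega
      rw [A_eq_applyOps matrix s R scale s_scale hss hRR,
        B_eq_applyOps matrix s R hs' hR' scale s_scale hss hRR]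
      apply List.ext_getElem (by rw [length_applyOps, length_applyOps])
      intro k h1 h2
      have hk : k < matrix.length := by rwa [length_applyOps] at h1
      have key : (applyOps (opsA matrix s R) matrix).getD k []
          = (applyOps (opsB (tmpB matrix s R (R * s)) s (R * s)) matrix).getD k [] := by
        by_cases hkN : k < R * s
        · have hdy0 : k % s < s := Nat.mod_lt _ hs'
          have hi0 : k / s < R := (Nat.div_lt_iff_lt_mul hs').mpr hkN
          have hk' : k / s * s + k % s = k := Nat.div_add_mod' k s
          have hrl : R * s ≤ (matrix.getD k []).length := hrow k hkN
          rw [← hk']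
          rw [A_row matrix s R hs' (k / s) (k % s) hi0 hdy0 hml (by rwa [hk'])]
          simp only [opsB]
          rw [getD_applyOps_map_range (FB (tmpB matrix s R (R * s)) s (R * s)) (R * s)
            matrix hml (k / s * s + k % s), if_pos (by rwa [hk'])]
          simp only [FB]
          congr 1
          unfold segB
          obtain ⟨ed, em⟩ := divmod_block s (k / s) (k % s) hs' hdy0
          rw [ed, em]
          apply List.map_congr_left
          intro c hc
          have hc' : c < R * s := List.mem_range.mp hc
          have hcs : c / s < R := (Nat.div_lt_iff_lt_mul hs').mpr hc'
          have hcm : c % s < s := Nat.mod_lt _ hs'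
          have hrr : c / s * s + k % s < R * s := blockIdx_lt s R (c / s) (k % s) hcs hdy0
          simp only [tmpB, opsT]
          rw [getD_applyOps_map_range (FT matrix s R (R * s)) (R * s) matrix hml
            (c / s * s + k % s), if_pos hrr]
          simp only [FT, segT]
          obtain ⟨ed2, em2⟩ := divmod_block s (c / s) (k % s) hs' hdy0
          rw [ed2, em2]
          have hRc : R - 1 - c / s < R :=
            lt_of_le_of_lt (Nat.sub_le _ _) (Nat.sub_lt hR' Nat.one_pos)
          have hflip : (R - 1 - c / s) * s + k % s < R * s :=
            blockIdx_lt s R (R - 1 - c / s) (k % s) hRc hdy0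
          have hlen2 : R * s ≤ (matrix.getD ((R - 1 - c / s) * s + k % s) []).length :=
            hrow _ hflip
          have hcol : k / s * s + c % s < R * s := blockIdx_lt s R (k / s) (c % s) hi0 hcm
          rw [getD_append_left _ _ _ (by
            rw [List.length_take]
            exact Nat.lt_min.mpr ⟨hcol, lt_of_lt_of_le hcol hlen2⟩)]
          rw [getD_take _ _ _ hcol]
          rfl
        · rw [getD_applyOps _ _
            (fun p hp => lt_of_lt_of_le (fst_opsA_lt matrix s R p hp) hml) k]
          rw [List.filter_eq_nil_iff.mpr (by
            intro p hp
            have := fst_opsA_lt matrix s R p hp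
            simp only [beq_iff_eq]
            omega)]
          simp only [List.map_nil, List.foldl_nil]
          simp only [opsB]
          rw [getD_applyOps_map_range (FB (tmpB matrix s R (R * s)) s (R * s)) (R * s)
            matrix hml k, if_neg hkN]
      rw [List.getD_eq_getElem _ [] h1, List.getD_eq_getElem _ [] h2] at key
      exact key
    · -- s_scale > 0 but repeat ≤ 0: no block fits, both return the matrix unchanged
      simp only [act_7, act_7_alt]
      rw [PySem.List.pyRange_one_eq_nil (by omega : PySem.Int.floordiv scale s_scale ≤ 0)]
      simp only [List.foldl_nil]
      have hnp : PySem.Int.floordiv scale s_scale * s_scale ≤ 0 := by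
        have h := mul_le_mul_of_nonneg_right (by omega : PySem.Int.floordiv scale s_scale ≤ 0)
          (le_of_lt hs)
        simpa using h
      rw [if_neg (by omega), if_pos hnp]
  · -- s_scale < 0: all inner ranges are empty, both return the matrix unchanged
    simp only [act_7, act_7_alt]
    rw [if_pos (by omega)]
    rw [PySem.List.pyRange_one_eq_nil (by omega : s_scale ≤ 0)]
    simp

-- ===== VERDICT (by name: the statement is the Claim_ definition above) =====
theorem act_7_spec : Claim_equal_act_7 := by
  intro scale matrix s_scale _ hpre
  exact act_7_main scale matrix s_scale hpre
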